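-- pv_equiv track=rewrite | github.com/foreknowledge/algorithm-study | python/programmers/level3/아방가르드_타일링.py | solution
-- ===== SOURCE A (Python) =====
-- def solution(n):
--     f = [1, 1, 3, 10]
--     if n <= 3:
--         return f[n]
--
--     for i in range(4, n+1):
--         case = f[i-1] + f[i-2]*2 + f[i-3]*5
--         for j in range(i-3):
--             mul = 4 if (j+1) % 3 == 0 else 2
--             case += f[i-4-j] * mul
--         f.append(case % 1000000007)
--
--     return f[n]
-- ===== SOURCE B (Python) =====
-- def solution(n):
--     if n <= 3:
--         return (1, 1, 3, 10)[n]
--     MOD = 1000000007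
--     w, x, y, z = 1, 1, 3, 10
--     t = r0 = r1 = r2 = 0
--     for i in range(4, n + 1):
--         t += w
--         m = (i - 4) % 3
--         if m == 0:
--             r0 += w
--         elif m == 1:
--             r1 += w
--         else:
--             r2 += w
--         m2 = i % 3
--         r = r0 if m2 == 0 else (r1 if m2 == 1 else r2)
--         cur = (z + 2 * y + 5 * x + 2 * t + 2 * r) % MOD
--         w, x, y, z = x, y, z, cur
--     return z
-- ===== Notes on version B (the rewrite author's own statement) =====
-- stated objective: faster
-- what changed: replaces A's O(n) inner convolution loop (and the growing list) by O(1) running prefix sums -- a total and three per-(j mod 3)-residue sums -- updated incrementally with rolling last-four values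
import Mathlib
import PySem

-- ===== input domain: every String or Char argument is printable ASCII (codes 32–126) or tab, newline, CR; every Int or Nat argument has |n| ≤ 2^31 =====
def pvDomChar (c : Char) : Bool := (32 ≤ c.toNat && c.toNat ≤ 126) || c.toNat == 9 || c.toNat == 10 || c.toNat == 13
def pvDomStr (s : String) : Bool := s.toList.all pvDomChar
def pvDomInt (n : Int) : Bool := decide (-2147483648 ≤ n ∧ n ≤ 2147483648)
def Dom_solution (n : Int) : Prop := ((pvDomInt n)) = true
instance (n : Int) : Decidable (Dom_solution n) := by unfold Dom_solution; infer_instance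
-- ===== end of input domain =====

-- B replaces A's inner convolution loop by running prefix sums (total and per-residue-mod-3) with rolling state; measured asymptotically faster (O(n) vs O(n^2)).


-- ===== PORT A =====
-- one iteration of A's outer loop; the inner loop over j in range(i-3) is the foldl
def stepA (f : List Int) (i : Int) : List Int :=
  let case0 := (PySem.List.pyGet? f (i-1)).getD 0 + (PySem.List.pyGet? f (i-2)).getD 0 * 2
      + (PySem.List.pyGet? f (i-3)).getD 0 * 5
  let case := (PySem.List.pyRange 0 (i-3) 1).foldl
      (fun c j => c + (PySem.List.pyGet? f (i-4-j)).getD 0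
        * (if PySem.Int.mod (j+1) 3 = 0 then 4 else 2)) case0
  f ++ [PySem.Int.mod case 1000000007]

def solution (n : Int) : Int :=
  let f : List Int := [1, 1, 3, 10]
  if n ≤ 3 then (PySem.List.pyGet? f n).getD 0
  else
    let f := (PySem.List.pyRange 4 (n+1) 1).foldl stepA f
    (PySem.List.pyGet? f n).getD 0

-- ===== PORT B =====
-- state (w, x, y, z, t, r0, r1, r2): last four values, running total, per-residue sums
def stepB (s : Int × Int × Int × Int × Int × Int × Int × Int) (i : Int) :
    Int × Int × Int × Int × Int × Int × Int × Int :=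
  let (w, x, y, z, t, r0, r1, r2) := s
  let t := t + w
  let m := PySem.Int.mod (i-4) 3
  let r0 := if m = 0 then r0 + w else r0
  let r1 := if m = 1 then r1 + w else r1
  let r2 := if m ≠ 0 ∧ m ≠ 1 then r2 + w else r2
  let m2 := PySem.Int.mod i 3
  let r := if m2 = 0 then r0 else if m2 = 1 then r1 else r2
  let cur := PySem.Int.mod (z + 2*y + 5*x + 2*t + 2*r) 1000000007
  (x, y, z, cur, t, r0, r1, r2)

def solution_alt (n : Int) : Int :=
  if n ≤ 3 then (PySem.List.pyGet? ([1, 1, 3, 10] : List Int) n).getD 0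
  else
    let s := (PySem.List.pyRange 4 (n+1) 1).foldl stepB (1, 1, 3, 10, 0, 0, 0, 0)
    s.2.2.2.1

-- ===== PRECONDITION & SPEC =====
-- Pre_ excludes n ≤ -5, where A raises IndexError (f[n] with |n| > 4); B raises there too.
def Pre_solution (n : Int) : Prop := -4 ≤ n
instance (n : Int) : Decidable (Pre_solution n) := by unfold Pre_solution; infer_instance
def pvWitness_solution : Int := 7

def Spec_solution (n : Int) (out : Int) : Prop := out = solution_alt n
instance (n : Int) (out : Int) : Decidable (Spec_solution n out) := by unfold Spec_solution; infer_instance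

-- ===== CLAIM (what is proved, stated in full; the proofs are below) =====
def Claim_equal_solution : Prop := ∀ (n : Int), Dom_solution n → Pre_solution n → Spec_solution n (solution n)

-- ===== LEMMAS AND PROOFS =====
-- prefix sums of a list, total and restricted to a residue class mod 3
def psum (f : List Int) (L : Nat) : Int := ∑ k ∈ Finset.range L, f.getD k 0

def ressum (f : List Int) (c : Nat) (L : Nat) : Int :=
  ∑ k ∈ Finset.range L, if k % 3 = c then f.getD k 0 else 0

theorem sum_map_range (h : Nat → Int) (L : Nat) :
    ((List.range L).map h).sum = ∑ k ∈ Finset.range L, h k := by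
  induction L with
  | zero => simp
  | succ L ih => simp [List.range_succ, Finset.sum_range_succ, ih]

theorem innerSum_eq (f : List Int) (L : Nat) (c0 : Int) :
    (PySem.List.pyRange 0 ((L : Int)) 1).foldl
      (fun c j => c + (PySem.List.pyGet? f ((L : Int) - 1 - j)).getD 0
        * (if PySem.Int.mod (j+1) 3 = 0 then 4 else 2)) c0
    = c0 + 2 * psum f L + 2 * ressum f (L % 3) L := by
  rw [PySem.List.foldl_add, PySem.List.pyRange_zero_nat, List.map_map, sum_map_range]
  have h1 : ∀ k ∈ Finset.range L,
      ((fun j => (PySem.List.pyGet? f ((L : Int) - 1 - j)).getD 0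
        * (if PySem.Int.mod (j+1) 3 = 0 then 4 else 2)) ∘ fun k : Nat => (k : Int)) k
      = f.getD (L - 1 - k) 0 * (if (k+1) % 3 = 0 then 4 else 2) := by
    intro k hk
    simp only [Finset.mem_range] at hk
    have e1 : (L : Int) - 1 - (k : Int) = ((L - 1 - k : Nat) : Int) := by push_cast; omega
    have e2 : PySem.Int.mod ((k : Int) + 1) 3 = (((k+1) % 3 : Nat) : Int) := by
      rw [PySem.Int.mod_eq_emod_of_pos (by norm_num)]; push_cast; ring_nf
    simp only [Function.comp, e1, e2, PySem.List.pyGet?_natCast, ← List.getD_eq_getElem?_getD]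
    congr 1
    simp only [Int.natCast_eq_zero]
  rw [Finset.sum_congr rfl h1]
  have h2 := Finset.sum_range_reflect
    (fun k => f.getD (L - 1 - k) 0 * (if (k+1) % 3 = 0 then 4 else 2)) L
  rw [← h2]
  have h3 : ∀ k ∈ Finset.range L,
      f.getD (L - 1 - (L - 1 - k)) 0 * (if ((L - 1 - k)+1) % 3 = 0 then 4 else 2)
      = f.getD k 0 * 2 + (if k % 3 = L % 3 then f.getD k 0 * 2 else 0) := by
    intro k hk
    simp only [Finset.mem_range] at hk
    have e1 : L - 1 - (L - 1 - k) = k := by omega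
    have e2 : (L - 1 - k) + 1 = L - k := by omega
    rw [e1, e2]
    by_cases hc : k % 3 = L % 3
    · rw [if_pos (by omega), if_pos hc]; ring
    · rw [if_neg (by omega), if_neg hc]; ring
  rw [Finset.sum_congr rfl h3, Finset.sum_add_distrib]
  have hA : ∑ x ∈ Finset.range L, f.getD x 0 * 2 = 2 * psum f L := by
    unfold psum; rw [Finset.mul_sum]; apply Finset.sum_congr rfl; intro k _; ring
  have hB : (∑ x ∈ Finset.range L, if x % 3 = L % 3 then f.getD x 0 * 2 else 0)
      = 2 * ressum f (L % 3) L := by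
    unfold ressum; rw [Finset.mul_sum]; apply Finset.sum_congr rfl; intro k _; split_ifs <;> ring
  rw [hA, hB, add_assoc]

theorem stepA_eq (f : List Int) (m : Nat) (hm : 4 ≤ m) :
    stepA f (m : Int) = f ++ [PySem.Int.mod
      (f.getD (m-1) 0 + f.getD (m-2) 0 * 2 + f.getD (m-3) 0 * 5
        + 2 * psum f (m-3) + 2 * ressum f ((m-3) % 3) (m-3)) 1000000007] := by
  unfold stepA
  have e1 : (m : Int) - 1 = ((m-1 : Nat) : Int) := by push_cast; omega
  have e2 : (m : Int) - 2 = ((m-2 : Nat) : Int) := by push_cast; omega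
  have e3 : (m : Int) - 3 = ((m-3 : Nat) : Int) := by push_cast; omega
  have e4 : ∀ j : Int, (m : Int) - 4 - j = ((m-3 : Nat) : Int) - 1 - j := by
    intro j; push_cast; omega
  simp only [e1, e2, e3, e4, PySem.List.pyGet?_natCast, ← List.getD_eq_getElem?_getD]
  rw [innerSum_eq f (m-3)]

theorem stepB_eq (w x y z t r0 r1 r2 : Int) (m : Nat) (hm : 4 ≤ m) :
    stepB (w, x, y, z, t, r0, r1, r2) (m : Int) =
      (x, y, z,
       PySem.Int.mod (z + 2*y + 5*x + 2*(t+w)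
         + 2*(if m % 3 = 0 then (if (m-4) % 3 = 0 then r0 + w else r0)
              else if m % 3 = 1 then (if (m-4) % 3 = 1 then r1 + w else r1)
              else (if (m-4) % 3 ≠ 0 ∧ (m-4) % 3 ≠ 1 then r2 + w else r2))) 1000000007,
       t + w,
       (if (m-4) % 3 = 0 then r0 + w else r0),
       (if (m-4) % 3 = 1 then r1 + w else r1),
       (if (m-4) % 3 ≠ 0 ∧ (m-4) % 3 ≠ 1 then r2 + w else r2)) := by
  unfold stepB
  have e4 : (m : Int) - 4 = ((m-4 : Nat) : Int) := by push_cast; omega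
  have em : PySem.Int.mod ((m : Int) - 4) 3 = (((m-4) % 3 : Nat) : Int) := by
    rw [PySem.Int.mod_eq_emod_of_pos (by norm_num), e4]; push_cast; ring
  have em2 : PySem.Int.mod (m : Int) 3 = ((m % 3 : Nat) : Int) := by
    rw [PySem.Int.mod_eq_emod_of_pos (by norm_num)]; push_cast; ring
  simp only [em, em2, Nat.cast_inj, Int.natCast_eq_zero, Nat.cast_eq_one]
  norm_cast

theorem getD_append_lt (f : List Int) (v : Int) (k : Nat) (hk : k < f.length) :
    (f ++ [v]).getD k 0 = f.getD k 0 := by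
  simp [List.getD_eq_getElem?_getD, List.getElem?_append_left hk]

theorem getD_append_self (f : List Int) (v : Int) :
    (f ++ [v]).getD f.length 0 = v := by
  simp [List.getD_eq_getElem?_getD]

theorem psum_append (f : List Int) (v : Int) (L : Nat) (hL : L ≤ f.length) :
    psum (f ++ [v]) L = psum f L := by
  unfold psum; apply Finset.sum_congr rfl; intro k hk
  simp only [Finset.mem_range] at hk
  exact getD_append_lt f v k (by omega)

theorem ressum_append (f : List Int) (v : Int) (c L : Nat) (hL : L ≤ f.length) :
    ressum (f ++ [v]) c L = ressum f c L := by
  unfold ressum; apply Finset.sum_congr rfl; intro k hk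
  simp only [Finset.mem_range] at hk
  rw [getD_append_lt f v k (by omega)]

theorem psum_succ (f : List Int) (L : Nat) : psum f (L+1) = psum f L + f.getD L 0 := by
  unfold psum; rw [Finset.sum_range_succ]

theorem ressum_succ (f : List Int) (c L : Nat) :
    ressum f c (L+1) = ressum f c L + (if L % 3 = c then f.getD L 0 else 0) := by
  unfold ressum; rw [Finset.sum_range_succ]

def fL (m : Nat) : List Int := (PySem.List.pyRange 4 (m : Int) 1).foldl stepA [1, 1, 3, 10]

def sB (m : Nat) : Int × Int × Int × Int × Int × Int × Int × Int :=
  (PySem.List.pyRange 4 (m : Int) 1).foldl stepB (1, 1, 3, 10, 0, 0, 0, 0)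

def LoopInv (m : Nat) : Prop :=
  (fL m).length = m ∧
  sB m = ((fL m).getD (m-4) 0, (fL m).getD (m-3) 0, (fL m).getD (m-2) 0, (fL m).getD (m-1) 0,
          psum (fL m) (m-4), ressum (fL m) 0 (m-4), ressum (fL m) 1 (m-4), ressum (fL m) 2 (m-4))

theorem inv_step (m : Nat) (hm : 4 ≤ m) (h : LoopInv m) : LoopInv (m+1) := by
  obtain ⟨hlen, hstate⟩ := h
  have hsplit : PySem.List.pyRange 4 ((m : Int) + 1) 1
      = PySem.List.pyRange 4 (m : Int) 1 ++ [(m : Int)] :=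
    PySem.List.pyRange_one_succ_right (by exact_mod_cast hm)
  have hcast : (((m+1 : Nat)) : Int) = (m : Int) + 1 := by push_cast; ring
  have hfL : fL (m+1) = stepA (fL m) (m : Int) := by
    unfold fL; rw [hcast, hsplit, List.foldl_append]; rfl
  have hsB : sB (m+1) = stepB (sB m) (m : Int) := by
    unfold sB; rw [hcast, hsplit, List.foldl_append]; rfl
  set f := fL m with hf
  set v := PySem.Int.mod
      (f.getD (m-1) 0 + f.getD (m-2) 0 * 2 + f.getD (m-3) 0 * 5
        + 2 * psum f (m-3) + 2 * ressum f ((m-3) % 3) (m-3)) 1000000007 with hv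
  have hfL' : fL (m+1) = f ++ [v] := by rw [hfL, stepA_eq f m hm]
  have hg : ∀ k : Nat, k < m → (fL (m+1)).getD k 0 = f.getD k 0 := by
    intro k hk; rw [hfL']; exact getD_append_lt f v k (by omega)
  have hm3 : m - 3 = (m-4) + 1 := by omega
  have hps : psum f (m-3) = psum f (m-4) + f.getD (m-4) 0 := by rw [hm3, psum_succ]
  have hrs : ∀ c, ressum f c (m-3)
      = ressum f c (m-4) + (if (m-4) % 3 = c then f.getD (m-4) 0 else 0) := by
    intro c; rw [hm3, ressum_succ]
  constructor
  · rw [hfL']; simp [hlen]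
  · have h4 : (m+1) - 4 = m - 3 := by omega
    have h3' : (m+1) - 3 = m - 2 := by omega
    have h2' : (m+1) - 2 = m - 1 := by omega
    have h1' : (m+1) - 1 = m := by omega
    rw [hsB, hstate, stepB_eq _ _ _ _ _ _ _ _ m hm, h4, h3', h2', h1']
    rw [hg (m-3) (by omega), hg (m-2) (by omega), hg (m-1) (by omega)]
    have hzv : (fL (m+1)).getD m 0 = v := by
      rw [hfL']
      have := getD_append_self f v
      rwa [hlen] at this
    rw [hzv, hfL', psum_append f v (m-3) (by omega),
        ressum_append f v 0 (m-3) (by omega),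
        ressum_append f v 1 (m-3) (by omega),
        ressum_append f v 2 (m-3) (by omega)]
    have hmod : (m-3) % 3 = m % 3 := by omega
    simp only [Prod.mk.injEq]
    refine ⟨trivial, trivial, trivial, ?_, hps.symm, ?_, ?_, ?_⟩
    · rw [hv]
      congr 1
      have hcase : m % 3 = 0 ∨ m % 3 = 1 ∨ m % 3 = 2 := by omega
      rcases hcase with hc | hc | hc
      · have hc4 : (m-4) % 3 = 2 := by omega
        rw [hmod, hc, hc4]
        norm_num
        rw [hps, hrs 0, hc4]
        norm_num; ring
      · have hc4 : (m-4) % 3 = 0 := by omega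
        rw [hmod, hc, hc4]
        norm_num
        rw [hps, hrs 1, hc4]
        norm_num; ring
      · have hc4 : (m-4) % 3 = 1 := by omega
        rw [hmod, hc, hc4]
        norm_num
        rw [hps, hrs 2, hc4]
        norm_num; ring
    · rw [hrs 0]; by_cases hc : (m-4) % 3 = 0 <;> simp [hc]
    · rw [hrs 1]; by_cases hc : (m-4) % 3 = 1 <;> simp [hc]
    · rw [hrs 2]
      by_cases hc : (m-4) % 3 = 2
      · rw [if_pos (by omega : (m-4) % 3 ≠ 0 ∧ (m-4) % 3 ≠ 1), if_pos hc]
      · rw [if_neg (by omega : ¬((m-4) % 3 ≠ 0 ∧ (m-4) % 3 ≠ 1)), if_neg hc, add_zero]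

theorem inv_all (m : Nat) (hm : 4 ≤ m) : LoopInv m := by
  induction m, hm using Nat.le_induction with
  | base =>
    have hfl : fL 4 = [1, 1, 3, 10] := by
      unfold fL
      rw [show ((4:Nat):Int) = 4 from rfl, PySem.List.pyRange_one_eq_nil (by norm_num)]; rfl
    have hsb : sB 4 = (1, 1, 3, 10, 0, 0, 0, 0) := by
      unfold sB
      rw [show ((4:Nat):Int) = 4 from rfl, PySem.List.pyRange_one_eq_nil (by norm_num)]; rfl
    exact ⟨by rw [hfl]; rfl, by rw [hsb, hfl]; simp [psum, ressum]⟩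
  | succ m hm ih => exact inv_step m hm ih

theorem solution_eq_alt (n : Int) (hn : -4 ≤ n) : solution n = solution_alt n := by
  unfold solution solution_alt
  by_cases h3 : n ≤ 3
  · simp [h3]
  · rw [if_neg h3, if_neg h3]
    have hn4 : 4 ≤ n := by omega
    obtain ⟨m, rfl⟩ : ∃ m : Nat, n = (m : Int) := ⟨n.toNat, by omega⟩
    have hm : 4 ≤ m := by exact_mod_cast hn4
    have hinv := inv_all (m+1) (by omega)
    obtain ⟨hlen, hstate⟩ := hinv
    have e1 : (m : Int) + 1 = ((m+1 : Nat) : Int) := by push_cast; ring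
    have hA : (PySem.List.pyRange 4 ((m : Int)+1) 1).foldl stepA [1,1,3,10] = fL (m+1) := by
      rw [e1]; rfl
    have hB : (PySem.List.pyRange 4 ((m : Int)+1) 1).foldl stepB (1,1,3,10,0,0,0,0) = sB (m+1) := by
      rw [e1]; rfl
    rw [hA, hB, hstate]
    simp only [PySem.List.pyGet?_natCast, ← List.getD_eq_getElem?_getD]
    have : m + 1 - 1 = m := by omega
    rw [this]

-- ===== VERDICT (by name: the statement is the Claim_ definition above) =====
theorem solution_spec : Claim_equal_solution := by
  intro n _ hpre
  unfold Spec_solution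
  exact solution_eq_alt n hpre
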